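-- pv_equiv track=rewrite | github.com/Zelaron/Sprecher-Network | benchmarks/kan_sn_inputshift_bump_bench.py | choose_kan_K_for_budget
-- ===== SOURCE A (Python) =====
-- from typing import Dict, List, Optional, Tuple
--
-- def kan_param_count(d_in: int, hidden: List[int], d_out: int, K: int) -> int:
--     dims = [d_in] + hidden + [d_out]
--     total = 0
--     for i in range(len(dims) - 1):
--         din = dims[i]
--         dout = dims[i + 1]
--         total += dout * din * K  # spline coeffs
--         total += dout  # bias
--     return total
--
-- def choose_kan_K_for_budget(
--     d_in: int,
--     hidden: List[int],
--     d_out: int,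
--     target_params: int,
--     K_min: int = 2,
--     K_max: int = 16,
-- ) -> int:
--     best_K = K_min
--     best_diff = float("inf")
--     for K in range(K_min, K_max + 1):
--         p = kan_param_count(d_in, hidden, d_out, K)
--         diff = abs(p - target_params)
--         if diff < best_diff:
--             best_diff = diff
--             best_K = K
--     return best_K
-- ===== SOURCE B (Python) =====
-- def choose_kan_K_for_budget(
--     d_in,
--     hidden,
--     d_out,
--     target_params,
--     K_min=2,
--     K_max=16,
-- ):
--     # param count is affine in K: p(K) = S*K + C, so the best K is at
--     # floor/ceil of (target - C)/S, clamped to [K_min, K_max], lower K on ties.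
--     if K_max < K_min:
--         return K_min
--     dims = [d_in] + hidden + [d_out]
--     S = sum(b * a for a, b in zip(dims, dims[1:]))
--     C = sum(dims[1:])
--     if S == 0:
--         return K_min
--     k0 = (target_params - C) // S  # floor of the real minimizer
--     if K_max <= k0:
--         return K_max
--     if K_min >= k0 + 1:
--         return K_min
--     if abs(S * k0 + C - target_params) <= abs(S * (k0 + 1) + C - target_params):
--         return k0
--     return k0 + 1
-- ===== Notes on version B (the rewrite author's own statement) =====
-- stated objective: alternative
-- what changed: B replaces the scan over every K in [K_min,K_max] (each re-running the parameter count) by computing the affine coefficients S,C of param_count(K)=S*K+C once and evaluating only floor((target-C)/S) and its successor clamped to the range, with the lower-K tie-break; it trades the range scan for a closed-form candidate pair, which helps only when the K range is wide.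
import Mathlib
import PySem

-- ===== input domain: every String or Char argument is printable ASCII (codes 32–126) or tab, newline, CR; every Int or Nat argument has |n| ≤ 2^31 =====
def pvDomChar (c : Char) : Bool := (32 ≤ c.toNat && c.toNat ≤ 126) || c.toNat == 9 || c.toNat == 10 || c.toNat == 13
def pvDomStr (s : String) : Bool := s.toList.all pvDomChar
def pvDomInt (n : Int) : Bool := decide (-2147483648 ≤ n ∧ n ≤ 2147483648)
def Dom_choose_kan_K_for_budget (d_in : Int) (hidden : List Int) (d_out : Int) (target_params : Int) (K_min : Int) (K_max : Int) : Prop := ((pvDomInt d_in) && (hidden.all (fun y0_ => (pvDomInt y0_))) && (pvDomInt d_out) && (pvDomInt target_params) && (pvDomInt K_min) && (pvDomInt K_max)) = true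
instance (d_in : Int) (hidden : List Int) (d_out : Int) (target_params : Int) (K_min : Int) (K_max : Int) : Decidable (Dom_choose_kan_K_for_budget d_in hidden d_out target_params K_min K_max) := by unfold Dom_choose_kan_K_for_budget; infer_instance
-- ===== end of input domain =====

-- B evaluates the affine parameter count only at floor((target-C)/S) and its successor (clamped),
-- instead of scanning every K in the range: same result by a closed-form candidate pair.

-- ===== PORT A =====
-- dims[i] / dims[i+1] are always in range inside the loop (0 ≤ i < len(dims)-1), so pyGetD with
-- default 0 is exact here.
def kan_param_count (d_in : Int) (hidden : List Int) (d_out : Int) (K : Int) : Int :=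
  let dims := [d_in] ++ hidden ++ [d_out]
  (PySem.List.pyRange 0 ((dims.length : Int) - 1) 1).foldl
    (fun total i =>
      let din := PySem.List.pyGetD dims i 0
      let dout := PySem.List.pyGetD dims (i + 1) 0
      total + dout * din * K + dout)
    0

-- loop body of A; Python's float("inf") sentinel is ported as `none : Option Int`
-- (every finite diff compares below it, exactly as in Python).
def kanBestStep (f : Int → Int) (st : Int × Option Int) (K : Int) : Int × Option Int :=
  let diff := f K
  match st.2 with
  | none => (K, some diff)
  | some bd => if diff < bd then (K, some diff) else st

def choose_kan_K_for_budget (d_in : Int) (hidden : List Int) (d_out : Int) (target_params : Int) (K_min : Int) (K_max : Int) : Int :=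
  ((PySem.List.pyRange K_min (K_max + 1) 1).foldl
    (kanBestStep (fun K => |kan_param_count d_in hidden d_out K - target_params|))
    (K_min, none)).1

-- ===== PORT B =====
def choose_kan_K_for_budget_alt (d_in : Int) (hidden : List Int) (d_out : Int) (target_params : Int) (K_min : Int) (K_max : Int) : Int :=
  if K_max < K_min then K_min
  else
    let dims := [d_in] ++ hidden ++ [d_out]
    let S := ((dims.zip dims.tail).map (fun ab => ab.2 * ab.1)).sum
    let C := dims.tail.sum
    if S = 0 then K_min
    else
      let k0 := PySem.Int.floordiv (target_params - C) S
      if K_max ≤ k0 then K_max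
      else if K_min ≥ k0 + 1 then K_min
      else if |S * k0 + C - target_params| ≤ |S * (k0 + 1) + C - target_params| then k0
      else k0 + 1

-- ===== PRECONDITION & SPEC =====
def Spec_choose_kan_K_for_budget (d_in : Int) (hidden : List Int) (d_out : Int) (target_params : Int) (K_min : Int) (K_max : Int) (out : Int) : Prop := out = choose_kan_K_for_budget_alt d_in hidden d_out target_params K_min K_max
instance (d_in : Int) (hidden : List Int) (d_out : Int) (target_params : Int) (K_min : Int) (K_max : Int) (out : Int) : Decidable (Spec_choose_kan_K_for_budget d_in hidden d_out target_params K_min K_max out) := by unfold Spec_choose_kan_K_for_budget; infer_instance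

-- ===== CLAIM (what is proved, stated in full; the proofs are below) =====
def Claim_equal_choose_kan_K_for_budget : Prop := ∀ (d_in : Int) (hidden : List Int) (d_out : Int) (target_params : Int) (K_min : Int) (K_max : Int), Dom_choose_kan_K_for_budget d_in hidden d_out target_params K_min K_max → Spec_choose_kan_K_for_budget d_in hidden d_out target_params K_min K_max (choose_kan_K_for_budget d_in hidden d_out target_params K_min K_max)

-- ===== LEMMAS AND PROOFS =====

theorem kan_foldl_pair_sum (K : Int) (l : List (Int × Int)) : ∀ t0 : Int,
    l.foldl (fun total ab => total + ab.2 * ab.1 * K + ab.2) t0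
      = t0 + (l.map (fun ab => ab.2 * ab.1)).sum * K + (l.map Prod.snd).sum := by
  induction l with
  | nil => intro t0; simp
  | cons x xs ih => intro t0; simp only [List.foldl_cons, List.map_cons, List.sum_cons, ih]; ring

theorem kan_map_pairs (dims : List Int) (hne : dims ≠ []) :
    (PySem.List.pyRange 0 ((dims.length : Int) - 1) 1).map
        (fun i => (PySem.List.pyGetD dims i 0, PySem.List.pyGetD dims (i + 1) 0))
      = dims.zip dims.tail := by
  have hlen : 1 ≤ dims.length := List.length_pos_of_ne_nil hne
  rw [PySem.List.pyRange_one]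
  rw [List.map_map]
  apply List.ext_getElem
  · simp
  · intro k h1 h2
    simp only [List.getElem_map, List.getElem_range, Function.comp_apply]
    have hk : k < dims.length - 1 := by simp at h1; omega
    have e2 : (0 : Int) + (k : Int) + 1 = (((k + 1) : Nat) : Int) := by omega
    have e1 : (0 : Int) + (k : Int) = ((k : Nat) : Int) := by omega
    rw [e2, e1, PySem.List.pyGetD_natCast, PySem.List.pyGetD_natCast, List.getElem_zip]
    congr 1
    · exact List.getD_eq_getElem _ _ (by omega)
    · rw [List.getD_eq_getElem _ _ (by omega), List.getElem_tail]

theorem kan_foldl_comp {α β γ : Type} (f : β → γ) (g : α → γ → α) (l : List β) (init : α) :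
    l.foldl (fun a x => g a (f x)) init = (l.map f).foldl g init := by
  rw [List.foldl_map]

theorem kan_param_count_affine (d_in : Int) (hidden : List Int) (d_out : Int) (K : Int) :
    kan_param_count d_in hidden d_out K =
      ((([d_in] ++ hidden ++ [d_out]).zip ([d_in] ++ hidden ++ [d_out]).tail).map
          (fun ab => ab.2 * ab.1)).sum * K
        + ([d_in] ++ hidden ++ [d_out]).tail.sum := by
  have hne : ([d_in] ++ hidden ++ [d_out]) ≠ [] := by simp
  unfold kan_param_count
  dsimp only
  rw [show (fun (total : Int) (i : Int) =>
        total + PySem.List.pyGetD ([d_in] ++ hidden ++ [d_out]) (i + 1) 0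
              * PySem.List.pyGetD ([d_in] ++ hidden ++ [d_out]) i 0 * K
              + PySem.List.pyGetD ([d_in] ++ hidden ++ [d_out]) (i + 1) 0)
      = (fun (total : Int) (i : Int) =>
          (fun (total : Int) (ab : Int × Int) => total + ab.2 * ab.1 * K + ab.2) total
            ((fun i => (PySem.List.pyGetD ([d_in] ++ hidden ++ [d_out]) i 0,
               PySem.List.pyGetD ([d_in] ++ hidden ++ [d_out]) (i + 1) 0)) i)) from rfl,
      kan_foldl_comp (fun i => (PySem.List.pyGetD ([d_in] ++ hidden ++ [d_out]) i 0,
               PySem.List.pyGetD ([d_in] ++ hidden ++ [d_out]) (i + 1) 0))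
          (fun (total : Int) (ab : Int × Int) => total + ab.2 * ab.1 * K + ab.2),
      kan_map_pairs _ hne, kan_foldl_pair_sum]
  rw [List.map_snd_zip (by simp)]
  ring

-- floor-division bracket (both signs of the divisor)
theorem kan_fdiv_bracket_pos (a b : Int) (hb : 0 < b) :
    b * PySem.Int.floordiv a b ≤ a ∧ a < b * PySem.Int.floordiv a b + b := by
  have h := PySem.Int.floordiv_mul_add_mod a b
  have h1 := PySem.Int.mod_nonneg a hb
  have h2 := PySem.Int.mod_lt a hb
  constructor <;> nlinarith [h, h1, h2]

theorem kan_fdiv_bracket_neg (a b : Int) (hb : b < 0) :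
    a ≤ b * PySem.Int.floordiv a b ∧ b * PySem.Int.floordiv a b + b < a := by
  have h := PySem.Int.floordiv_mul_add_mod a b
  have h2 := PySem.Int.mod_neg_bounds a hb
  constructor <;> nlinarith [h, h2.1, h2.2]

-- |b*k + c - t| on the left of the floor point: linear with slope -|b|
theorem kan_abs_left (b c t k : Int) (hb : b ≠ 0)
    (hk : k ≤ PySem.Int.floordiv (t - c) b) :
    |b * k + c - t| = |b * PySem.Int.floordiv (t - c) b + c - t|
      + |b| * (PySem.Int.floordiv (t - c) b - k) := by
  set q := PySem.Int.floordiv (t - c) b with hq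
  rcases lt_or_gt_of_ne hb with hneg | hpos
  · have hbr := kan_fdiv_bracket_neg (t - c) b hneg
    have hkq : b * q ≤ b * k := mul_le_mul_of_nonpos_left hk (le_of_lt hneg)
    rw [abs_of_nonneg (by linarith [hbr.1] : (0:Int) ≤ b * k + c - t),
        abs_of_nonneg (by linarith [hbr.1] : (0:Int) ≤ b * q + c - t),
        abs_of_neg hneg]
    ring
  · have hbr := kan_fdiv_bracket_pos (t - c) b hpos
    have hkq : b * k ≤ b * q := mul_le_mul_of_nonneg_left hk (le_of_lt hpos)
    rw [abs_of_nonpos (by linarith [hbr.1] : b * k + c - t ≤ 0),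
        abs_of_nonpos (by linarith [hbr.1] : b * q + c - t ≤ 0),
        abs_of_pos hpos]
    ring

-- |b*k + c - t| on the right of the floor point: linear with slope |b|
theorem kan_abs_right (b c t k : Int) (hb : b ≠ 0)
    (hk : PySem.Int.floordiv (t - c) b + 1 ≤ k) :
    |b * k + c - t| = |b * (PySem.Int.floordiv (t - c) b + 1) + c - t|
      + |b| * (k - PySem.Int.floordiv (t - c) b - 1) := by
  set q := PySem.Int.floordiv (t - c) b with hq
  rcases lt_or_gt_of_ne hb with hneg | hpos
  · have hbr := kan_fdiv_bracket_neg (t - c) b hneg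
    have hkq : b * k ≤ b * (q + 1) := mul_le_mul_of_nonpos_left hk (le_of_lt hneg)
    rw [abs_of_nonpos (by nlinarith [hbr.2] : b * k + c - t ≤ 0),
        abs_of_nonpos (by nlinarith [hbr.2] : b * (q + 1) + c - t ≤ 0),
        abs_of_neg hneg]
    ring
  · have hbr := kan_fdiv_bracket_pos (t - c) b hpos
    have hkq : b * (q + 1) ≤ b * k := mul_le_mul_of_nonneg_left hk (le_of_lt hpos)
    rw [abs_of_nonneg (by nlinarith [hbr.2] : (0:Int) ≤ b * k + c - t),
        abs_of_nonneg (by nlinarith [hbr.2] : (0:Int) ≤ b * (q + 1) + c - t),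
        abs_of_pos hpos]
    ring

theorem kan_f_dec (b c t k : Int) (hb : b ≠ 0)
    (hk : k + 1 ≤ PySem.Int.floordiv (t - c) b) :
    |b * (k + 1) + c - t| < |b * k + c - t| := by
  have h1 := kan_abs_left b c t k hb (by omega)
  have h2 := kan_abs_left b c t (k + 1) hb hk
  have hA : 1 ≤ |b| := Int.one_le_abs hb
  nlinarith [h1, h2, hA]

theorem kan_f_mono_right (b c t j x : Int) (hb : b ≠ 0)
    (hj : PySem.Int.floordiv (t - c) b + 1 ≤ j) (hx : j ≤ x) :
    |b * j + c - t| ≤ |b * x + c - t| := by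
  have h1 := kan_abs_right b c t j hb hj
  have h2 := kan_abs_right b c t x hb (by omega)
  have := mul_le_mul_of_nonneg_left (by omega : j - PySem.Int.floordiv (t - c) b - 1 ≤ x - PySem.Int.floordiv (t - c) b - 1) (abs_nonneg b)
  linarith

theorem kan_noupdate (f : Int → Int) (l : List Int) (bk bd : Int)
    (h : ∀ x ∈ l, ¬ f x < bd) :
    l.foldl (kanBestStep f) (bk, some bd) = (bk, some bd) := by
  induction l with
  | nil => rfl
  | cons x xs ih =>
    have hx : kanBestStep f (bk, some bd) x = (bk, some bd) := by
      simp [kanBestStep, h x (List.mem_cons_self)]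
    rw [List.foldl_cons, hx]
    exact ih (fun y hy => h y (List.mem_cons_of_mem _ hy))

theorem kan_descend (f : Int → Int) (n : Nat) : ∀ a b : Int, (b - a).toNat = n → a ≤ b →
    (∀ k, a ≤ k → k < b → f (k + 1) < f k) →
    (PySem.List.pyRange (a + 1) (b + 1) 1).foldl (kanBestStep f) (a, some (f a))
      = (b, some (f b)) := by
  induction n with
  | zero =>
    intro a b hn hab _
    have : a = b := by omega
    subst this
    rw [PySem.List.pyRange_one_eq_nil (by omega)]
    rfl
  | succ n ih =>
    intro a b hn hab hdec
    have hlt : a < b := by omega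
    rw [PySem.List.pyRange_one_cons (by omega : a + 1 < b + 1), List.foldl_cons]
    have hstep : kanBestStep f (a, some (f a)) (a + 1) = (a + 1, some (f (a + 1))) := by
      simp [kanBestStep, hdec a le_rfl hlt]
    rw [hstep]
    have := ih (a + 1) b (by omega) (by omega)
      (fun k hk1 hk2 => hdec k (by omega) hk2)
    rw [show a + 1 + 1 = a + 2 from by ring] at this ⊢
    exact this

-- ===== VERDICT (by name: the statement is the Claim_ definition above) =====
theorem choose_kan_K_for_budget_spec : Claim_equal_choose_kan_K_for_budget := by
  intro d_in hidden d_out t K_min K_max _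
  unfold Spec_choose_kan_K_for_budget
  unfold choose_kan_K_for_budget choose_kan_K_for_budget_alt
  dsimp only
  set dims := [d_in] ++ hidden ++ [d_out] with hdims
  set S := ((dims.zip dims.tail).map (fun ab => ab.2 * ab.1)).sum with hSdef
  set C := dims.tail.sum with hCdef
  set F := fun K => |kan_param_count d_in hidden d_out K - t| with hF
  have hFv : ∀ K, F K = |S * K + C - t| := by
    intro K; rw [hF]; dsimp only; rw [kan_param_count_affine]
  by_cases hk : K_max < K_min
  · rw [if_pos hk, PySem.List.pyRange_one_eq_nil (by omega)]
    rfl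
  · rw [if_neg hk]
    rw [not_lt] at hk
    rw [PySem.List.pyRange_one_cons (by omega : K_min < K_max + 1), List.foldl_cons]
    have hstep0 : kanBestStep F (K_min, none) K_min = (K_min, some (F K_min)) := rfl
    rw [hstep0]
    by_cases hSz : S = 0
    · rw [if_pos hSz]
      rw [kan_noupdate F _ K_min (F K_min)
        (by intro x hx; rw [hFv, hFv, hSz]; simp)]
    · rw [if_neg hSz]
      set q := PySem.Int.floordiv (t - C) S with hq
      by_cases h1 : K_max ≤ q
      · rw [if_pos h1]
        rw [kan_descend F (K_max - K_min).toNat K_min K_max rfl hk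
          (by intro k hk1 hk2; rw [hFv, hFv]; exact kan_f_dec S C t k hSz (by omega))]
      · rw [if_neg h1]
        rw [not_le] at h1
        by_cases h2 : K_min ≥ q + 1
        · rw [if_pos h2]
          rw [kan_noupdate F _ K_min (F K_min)
            (by
              intro x hx
              have hxm := (PySem.List.mem_pyRange_one.mp hx).1
              rw [hFv, hFv]
              have := kan_f_mono_right S C t K_min x hSz h2 (by omega)
              linarith)]
        · rw [ge_iff_le, not_le] at h2
          rw [if_neg (by omega : ¬ K_min ≥ q + 1)]
          rw [PySem.List.pyRange_one_append (K_min + 1) (q + 1) (K_max + 1) (by omega) (by omega),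
              List.foldl_append]
          rw [kan_descend F (q - K_min).toNat K_min q rfl (by omega)
            (by intro k hk1 hk2; rw [hFv, hFv]; exact kan_f_dec S C t k hSz (by omega))]
          rw [PySem.List.pyRange_one_cons (by omega : q + 1 < K_max + 1), List.foldl_cons]
          by_cases hc : F (q + 1) < F q
          · have hstep : kanBestStep F (q, some (F q)) (q + 1) = (q + 1, some (F (q + 1))) := by
              simp [kanBestStep, hc]
            rw [hstep]
            rw [kan_noupdate F _ (q + 1) (F (q + 1))
              (by
                intro x hx
                have hxm := (PySem.List.mem_pyRange_one.mp hx).1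
                rw [hFv, hFv]
                have := kan_f_mono_right S C t (q + 1) x hSz (by omega) (by omega)
                linarith)]
            rw [if_neg (by rw [← hFv q, ← hFv (q + 1)]; omega)]
          · have hstep : kanBestStep F (q, some (F q)) (q + 1) = (q, some (F q)) := by
              simp [kanBestStep, hc]
            rw [hstep]
            have hle : F q ≤ F (q + 1) := not_lt.mp hc
            rw [kan_noupdate F _ q (F q)
              (by
                intro x hx
                have hxm := (PySem.List.mem_pyRange_one.mp hx).1
                rw [hFv, hFv]
                have h3 := kan_f_mono_right S C t (q + 1) x hSz (by omega) (by omega)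
                have h4 := hle
                rw [hFv, hFv] at h4
                linarith)]
            rw [if_pos (by rw [← hFv q, ← hFv (q + 1)]; exact hle)]
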